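-- pv_equiv track=rewrite | github.com/KistCloudRobot/TaskPolicyLearner | CloudEnv.py | get_b_e
-- ===== SOURCE A (Python) =====
-- def get_b_e(preds):
--     b_e = [0, 0, 0, 0, 0]
--     for pred in preds:
--         pred = pred.split()
--         if pred[0] == "batteryRemain":
--             if int(pred[2]) > 80:
--                 b_e[4] = 1
--             elif int(pred[2]) > 60:
--                 b_e[3] = 1
--             elif int(pred[2]) > 40:
--                 b_e[2] = 1
--             elif int(pred[2]) > 20:
--                 b_e[1] = 1
--             else:
--                 b_e[0] = 1
--     return b_e
-- ===== SOURCE B (Python) =====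
-- def get_b_e(preds):
--     # Stage 1: extract all batteryRemain values.
--     vals = []
--     for pred in preds:
--         toks = pred.split()
--         if toks[0] == "batteryRemain":
--             vals.append(int(toks[2]))
--     # Stage 2: each flag is an existential interval test over the collected values.
--     return [int(any((i == 0 or v > 20 * i) and (i == 4 or v <= 20 * (i + 1)) for v in vals))
--             for i in range(5)]
-- ===== Notes on version B (the rewrite author's own statement) =====
-- stated objective: alternative
-- what changed: B is a two-stage pipeline: it first extracts the list of batteryRemain values, then computes each of the five flags independently as an existential interval-membership test (any v in (20i, 20(i+1)], with open ends at the extremes) over that list, instead of A's single pass that mutates a preallocated flag list through a five-way comparison cascade.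
import Mathlib
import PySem

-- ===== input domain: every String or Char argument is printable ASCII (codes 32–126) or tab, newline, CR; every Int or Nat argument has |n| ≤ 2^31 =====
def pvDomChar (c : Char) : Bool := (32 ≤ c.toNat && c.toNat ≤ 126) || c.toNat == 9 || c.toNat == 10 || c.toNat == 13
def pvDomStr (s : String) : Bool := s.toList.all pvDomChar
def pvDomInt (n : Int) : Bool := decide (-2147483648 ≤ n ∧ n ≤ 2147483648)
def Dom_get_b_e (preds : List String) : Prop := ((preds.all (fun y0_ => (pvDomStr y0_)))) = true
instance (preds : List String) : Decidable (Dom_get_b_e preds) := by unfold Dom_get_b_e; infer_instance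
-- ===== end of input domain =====

-- B is a two-stage pipeline: extract the batteryRemain values, then compute each flag as an
-- existential interval test over that list (objective: alternative decomposition, same cost).

-- ===== PORT A =====
-- pyGetD/ofStr?.getD are the total forms of pred[0]/pred[2]/int(...): exact under Pre_get_b_e,
-- which guarantees the accesses and the parse succeed (Python raises outside it).
def get_b_e (preds : List String) : List Int :=
  preds.foldl (fun b_e pred =>
    let toks := PySem.Str.split₀ pred
    if PySem.List.pyGetD toks 0 "" = "batteryRemain" then
      let v := (PySem.Int.ofStr? (PySem.List.pyGetD toks 2 "")).getD 0
      if v > 80 then PySem.List.pySetD b_e 4 1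
      else if v > 60 then PySem.List.pySetD b_e 3 1
      else if v > 40 then PySem.List.pySetD b_e 2 1
      else if v > 20 then PySem.List.pySetD b_e 1 1
      else PySem.List.pySetD b_e 0 1
    else b_e) [0, 0, 0, 0, 0]

-- ===== PORT B =====
def get_b_e_alt (preds : List String) : List Int :=
  let vals : List Int := preds.foldl (fun vals pred =>
    let toks := PySem.Str.split₀ pred
    if PySem.List.pyGetD toks 0 "" = "batteryRemain" then
      vals ++ [(PySem.Int.ofStr? (PySem.List.pyGetD toks 2 "")).getD 0]
    else vals) []
  (PySem.List.pyRange 0 5 1).map (fun i =>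
    if vals.any (fun v =>
        (i == 0 || decide (v > 20 * i)) && (i == 4 || decide (v ≤ 20 * (i + 1))))
    then (1 : Int) else 0)

-- ===== PRECONDITION & SPEC =====
-- Pre_ excludes exactly the inputs on which the Python raises: a whitespace-only predicate
-- (IndexError on pred[0]) or a "batteryRemain" predicate with fewer than three tokens
-- (IndexError) or an unparseable third token (ValueError).
def Pre_get_b_e (preds : List String) : Prop :=
  ∀ p ∈ preds,
    PySem.Str.split₀ p ≠ [] ∧
    (PySem.List.pyGetD (PySem.Str.split₀ p) 0 "" = "batteryRemain" →
      3 ≤ (PySem.Str.split₀ p).length ∧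
      (PySem.Int.ofStr? (PySem.List.pyGetD (PySem.Str.split₀ p) 2 "")).isSome)
instance (preds : List String) : Decidable (Pre_get_b_e preds) := by
  unfold Pre_get_b_e; infer_instance
def pvWitness_get_b_e : List String := (["batteryRemain r 75", "door open"])
def Spec_get_b_e (preds : List String) (out : List Int) : Prop := out = get_b_e_alt preds
instance (preds : List String) (out : List Int) : Decidable (Spec_get_b_e preds out) := by unfold Spec_get_b_e; infer_instance

-- ===== CLAIM (what is proved, stated in full; the proofs are below) =====
def Claim_equal_get_b_e : Prop := ∀ (preds : List String), Dom_get_b_e preds → Pre_get_b_e preds → Spec_get_b_e preds (get_b_e preds)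

-- ===== LEMMAS AND PROOFS =====

-- the flag list determined by a value list (B's stage 2)
def pvFlags (vals : List Int) : List Int :=
  (PySem.List.pyRange 0 5 1).map (fun i =>
    if vals.any (fun v =>
        (i == 0 || decide (v > 20 * i)) && (i == 4 || decide (v ≤ 20 * (i + 1))))
    then (1 : Int) else 0)

lemma pvFlags_eq (vals : List Int) :
    pvFlags vals =
      [if vals.any (fun v => decide (v ≤ 20)) then 1 else 0,
       if vals.any (fun v => decide (v > 20) && decide (v ≤ 40)) then 1 else 0,
       if vals.any (fun v => decide (v > 40) && decide (v ≤ 60)) then 1 else 0,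
       if vals.any (fun v => decide (v > 60) && decide (v ≤ 80)) then 1 else 0,
       if vals.any (fun v => decide (v > 80)) then 1 else 0] := by
  have h : PySem.List.pyRange 0 5 1 = [0, 1, 2, 3, 4] := by decide
  simp [pvFlags, h]

lemma pvFlags_append (vals : List Int) (v : Int) :
    pvFlags (vals ++ [v]) =
      (if v > 80 then PySem.List.pySetD (pvFlags vals) 4 1
       else if v > 60 then PySem.List.pySetD (pvFlags vals) 3 1
       else if v > 40 then PySem.List.pySetD (pvFlags vals) 2 1
       else if v > 20 then PySem.List.pySetD (pvFlags vals) 1 1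
       else PySem.List.pySetD (pvFlags vals) 0 1) := by
  rw [pvFlags_eq, pvFlags_eq]
  simp only [List.any_append, List.any_cons, List.any_nil, Bool.or_false]
  by_cases h1 : v > 80
  · rw [if_pos h1]
    simp [PySem.List.pySetD, PySem.List.pySet?, PySem.List.pyIdx?, List.set,
      decide_eq_false (show ¬(v ≤ (20:Int)) by omega),
      decide_eq_false (show ¬(v ≤ (40:Int)) by omega),
      decide_eq_false (show ¬(v ≤ (60:Int)) by omega),
      decide_eq_false (show ¬(v ≤ (80:Int)) by omega),
      decide_eq_true (show v > (20:Int) by omega),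
      decide_eq_true (show v > (40:Int) by omega),
      decide_eq_true (show v > (60:Int) by omega),
      decide_eq_true (show v > (80:Int) by omega)]
  rw [if_neg h1]
  by_cases h2 : v > 60
  · rw [if_pos h2]
    simp [PySem.List.pySetD, PySem.List.pySet?, PySem.List.pyIdx?, List.set,
      decide_eq_false (show ¬(v ≤ (20:Int)) by omega),
      decide_eq_false (show ¬(v ≤ (40:Int)) by omega),
      decide_eq_false (show ¬(v ≤ (60:Int)) by omega),
      decide_eq_true (show v ≤ (80:Int) by omega),
      decide_eq_true (show v > (20:Int) by omega),
      decide_eq_true (show v > (40:Int) by omega),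
      decide_eq_true (show v > (60:Int) by omega),
      decide_eq_false (show ¬(v > (80:Int)) by omega)]
  rw [if_neg h2]
  by_cases h3 : v > 40
  · rw [if_pos h3]
    simp [PySem.List.pySetD, PySem.List.pySet?, PySem.List.pyIdx?, List.set,
      decide_eq_false (show ¬(v ≤ (20:Int)) by omega),
      decide_eq_false (show ¬(v ≤ (40:Int)) by omega),
      decide_eq_true (show v ≤ (60:Int) by omega),
      decide_eq_true (show v ≤ (80:Int) by omega),
      decide_eq_true (show v > (20:Int) by omega),
      decide_eq_true (show v > (40:Int) by omega),
      decide_eq_false (show ¬(v > (60:Int)) by omega),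
      decide_eq_false (show ¬(v > (80:Int)) by omega)]
  rw [if_neg h3]
  by_cases h4 : v > 20
  · rw [if_pos h4]
    simp [PySem.List.pySetD, PySem.List.pySet?, PySem.List.pyIdx?, List.set,
      decide_eq_false (show ¬(v ≤ (20:Int)) by omega),
      decide_eq_true (show v ≤ (40:Int) by omega),
      decide_eq_true (show v ≤ (60:Int) by omega),
      decide_eq_true (show v ≤ (80:Int) by omega),
      decide_eq_true (show v > (20:Int) by omega),
      decide_eq_false (show ¬(v > (40:Int)) by omega),
      decide_eq_false (show ¬(v > (60:Int)) by omega),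
      decide_eq_false (show ¬(v > (80:Int)) by omega)]
  rw [if_neg h4]
  simp [PySem.List.pySetD, PySem.List.pySet?, PySem.List.pyIdx?, List.set,
      decide_eq_true (show v ≤ (20:Int) by omega),
      decide_eq_true (show v ≤ (40:Int) by omega),
      decide_eq_true (show v ≤ (60:Int) by omega),
      decide_eq_true (show v ≤ (80:Int) by omega),
      decide_eq_false (show ¬(v > (20:Int)) by omega),
      decide_eq_false (show ¬(v > (40:Int)) by omega),
      decide_eq_false (show ¬(v > (60:Int)) by omega),
      decide_eq_false (show ¬(v > (80:Int)) by omega)]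

lemma pvLoop (preds : List String) (vals : List Int) :
    preds.foldl (fun b_e pred =>
      let toks := PySem.Str.split₀ pred
      if PySem.List.pyGetD toks 0 "" = "batteryRemain" then
        let v := (PySem.Int.ofStr? (PySem.List.pyGetD toks 2 "")).getD 0
        if v > 80 then PySem.List.pySetD b_e 4 1
        else if v > 60 then PySem.List.pySetD b_e 3 1
        else if v > 40 then PySem.List.pySetD b_e 2 1
        else if v > 20 then PySem.List.pySetD b_e 1 1
        else PySem.List.pySetD b_e 0 1
      else b_e) (pvFlags vals) =
    pvFlags (preds.foldl (fun vals pred =>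
      let toks := PySem.Str.split₀ pred
      if PySem.List.pyGetD toks 0 "" = "batteryRemain" then
        vals ++ [(PySem.Int.ofStr? (PySem.List.pyGetD toks 2 "")).getD 0]
      else vals) vals) := by
  induction preds generalizing vals with
  | nil => rfl
  | cons p rest ih =>
    simp only [List.foldl_cons]
    by_cases hg : PySem.List.pyGetD (PySem.Str.split₀ p) 0 "" = "batteryRemain"
    · simp only [hg, if_pos]
      rw [← pvFlags_append]
      exact ih _
    · simp only [hg, if_false]
      exact ih vals

-- ===== VERDICT (by name: the statement is the Claim_ definition above) =====
theorem get_b_e_spec : Claim_equal_get_b_e := by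
  intro preds _ _
  unfold Spec_get_b_e get_b_e get_b_e_alt
  have h0 : ([0, 0, 0, 0, 0] : List Int) = pvFlags [] := by decide
  rw [h0, pvLoop]
  rfl
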